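-- pv_equiv track=rewrite | github.com/Aaron383/CMPUT303 | piano.py | checkAnswer
-- ===== SOURCE A (Python) =====
-- import heapq
--
-- def checkAnswer(p, orders, skipDays):
--   move_i = 0
--   end_times = []
--   for day in range(1, 101):
--       while move_i < len(orders) and orders[move_i][0] <= day:
--           heapq.heappush(end_times, orders[move_i][1])
--           move_i += 1
--       if day % 7 not in skipDays:
--           for _ in range(p // 2):
--               if not end_times:
--                   break
--               heapq.heappop(end_times)
--       if end_times and end_times[0] <= day:
--           return False
--       if not end_times and move_i == len(orders):
--           break
--   return True
-- ===== SOURCE B (Python) =====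
-- def checkAnswer(p, orders, skipDays):
--     move_i = 0
--     end_times = []  # pending deadlines, kept sorted ascending
--     drop = max(p // 2, 0)
--     for day in range(1, 101):
--         while move_i < len(orders) and orders[move_i][0] <= day:
--             x = orders[move_i][1]
--             i = 0
--             while i < len(end_times) and end_times[i] <= x:
--                 i += 1
--             end_times.insert(i, x)
--             move_i += 1
--         if day % 7 not in skipDays:
--             del end_times[:drop]
--         if end_times and end_times[0] <= day:
--             return False
--         if not end_times and move_i == len(orders):
--             break
--     return True
-- ===== Notes on version B (the rewrite author's own statement) =====
-- stated objective: simpler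
-- what changed: Replaces the binary min-heap by a plain sorted list: releases insert each deadline at its sorted position, and the per-day 'pop p//2 smallest' loop disappears into a single slice-delete of the list's front.
import Mathlib
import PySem

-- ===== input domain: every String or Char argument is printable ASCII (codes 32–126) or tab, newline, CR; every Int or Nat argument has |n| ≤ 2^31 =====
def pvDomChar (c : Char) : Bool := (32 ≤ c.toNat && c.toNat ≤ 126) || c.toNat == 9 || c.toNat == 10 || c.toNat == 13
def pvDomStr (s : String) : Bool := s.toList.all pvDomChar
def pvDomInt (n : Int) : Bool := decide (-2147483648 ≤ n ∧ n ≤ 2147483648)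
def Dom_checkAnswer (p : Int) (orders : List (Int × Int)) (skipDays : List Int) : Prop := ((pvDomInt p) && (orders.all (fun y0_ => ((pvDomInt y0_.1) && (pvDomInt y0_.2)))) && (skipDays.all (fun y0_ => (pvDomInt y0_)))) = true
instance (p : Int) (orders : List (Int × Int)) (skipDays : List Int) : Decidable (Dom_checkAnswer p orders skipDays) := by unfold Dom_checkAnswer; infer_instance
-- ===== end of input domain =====

-- B replaces A's binary min-heap of pending deadlines by a plain sorted list: releases
-- insert at the sorted position and the per-day pop loop becomes one front slice-delete.
-- Same return value on every input; no speed claim.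

-- ===== PORT A =====
-- heapq is not in PySem, so its routines are ported by hand, step for step from CPython's
-- heapq.py (_siftdown / _siftup / heappush / heappop); exact for Int elements: every index
-- the Python code reads is in range, so List.getD returns exactly the slot Python reads.

def pvSiftdown (heap : List Int) (startpos pos : Nat) (newitem : Int) : List Int :=
  if _h : startpos < pos then
    let parentpos := (pos - 1) / 2
    let parent := heap.getD parentpos 0
    if newitem < parent then
      pvSiftdown (heap.set pos parent) startpos parentpos newitem
    else heap.set pos newitem
  else heap.set pos newitem
termination_by pos
decreasing_by exact Nat.lt_of_le_of_lt (Nat.div_le_self _ _) (by omega)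

def pvSiftup (heap : List Int) (startpos pos : Nat) (newitem : Int) : List Int :=
  if _h : 2 * pos + 1 < heap.length then
    let childpos := 2 * pos + 1
    let c := if childpos + 1 < heap.length ∧ ¬ (heap.getD childpos 0 < heap.getD (childpos + 1) 0)
             then childpos + 1 else childpos
    pvSiftup (heap.set pos (heap.getD c 0)) startpos c newitem
  else pvSiftdown (heap.set pos newitem) startpos pos newitem
termination_by heap.length - pos
decreasing_by simp only [List.length_set]; split <;> omega

def pvHeappush (heap : List Int) (item : Int) : List Int :=
  pvSiftdown (heap ++ [item]) 0 heap.length item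

def pvHeappopHeap (heap : List Int) : List Int :=
  let lastelt := heap.getLast?.getD 0
  let rest := heap.dropLast
  if rest.isEmpty then [] else pvSiftup (rest.set 0 lastelt) 0 0 lastelt

def pvReleaseA (orders : List (Int × Int)) (day : Int) (move_i : Nat) (h : List Int) :
    Nat × List Int :=
  if _hm : move_i < orders.length ∧ (orders.getD move_i (0, 0)).1 ≤ day then
    pvReleaseA orders day (move_i + 1) (pvHeappush h (orders.getD move_i (0, 0)).2)
  else (move_i, h)
termination_by orders.length - move_i
decreasing_by omega

def pvPopLoop (n : Nat) (h : List Int) : List Int :=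
  match n with
  | 0 => h
  | n + 1 => if h.isEmpty then h else pvPopLoop n (pvHeappopHeap h)

def pvDayLoopA (p : Int) (orders : List (Int × Int)) (skipDays : List Int)
    (day : Nat) (move_i : Nat) (h : List Int) : Bool :=
  if _hd : day ≤ 100 then
    let st := pvReleaseA orders (Int.ofNat day) move_i h
    let h2 := if skipDays.contains (PySem.Int.mod (Int.ofNat day) 7) then st.2
              else pvPopLoop (PySem.Int.floordiv p 2).toNat st.2
    if ¬ h2.isEmpty ∧ h2.getD 0 0 ≤ Int.ofNat day then false
    else if h2.isEmpty ∧ st.1 = orders.length then true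
    else pvDayLoopA p orders skipDays (day + 1) st.1 h2
  else true
termination_by 101 - day
decreasing_by omega

def checkAnswer (p : Int) (orders : List (Int × Int)) (skipDays : List Int) : Bool :=
  pvDayLoopA p orders skipDays 1 0 []

-- ===== PORT B =====
-- Source B's hand-written sorted insertion: scan past the entries ≤ x, insert x there
def pvInsort (x : Int) : List Int → List Int
  | [] => [x]
  | y :: ys => if y ≤ x then y :: pvInsort x ys else x :: y :: ys

def pvReleaseB (orders : List (Int × Int)) (day : Int) (move_i : Nat) (s : List Int) :
    Nat × List Int :=
  if _hm : move_i < orders.length ∧ (orders.getD move_i (0, 0)).1 ≤ day then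
    pvReleaseB orders day (move_i + 1) (pvInsort (orders.getD move_i (0, 0)).2 s)
  else (move_i, s)
termination_by orders.length - move_i
decreasing_by omega

def pvDayLoopB (p : Int) (orders : List (Int × Int)) (skipDays : List Int)
    (day : Nat) (move_i : Nat) (s : List Int) : Bool :=
  if _hd : day ≤ 100 then
    let st := pvReleaseB orders (Int.ofNat day) move_i s
    let s2 := if skipDays.contains (PySem.Int.mod (Int.ofNat day) 7) then st.2
              else st.2.drop (PySem.Int.floordiv p 2).toNat
    if ¬ s2.isEmpty ∧ s2.getD 0 0 ≤ Int.ofNat day then false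
    else if s2.isEmpty ∧ st.1 = orders.length then true
    else pvDayLoopB p orders skipDays (day + 1) st.1 s2
  else true
termination_by 101 - day
decreasing_by omega

def checkAnswer_alt (p : Int) (orders : List (Int × Int)) (skipDays : List Int) : Bool :=
  pvDayLoopB p orders skipDays 1 0 []

-- ===== PRECONDITION & SPEC =====
def Spec_checkAnswer (p : Int) (orders : List (Int × Int)) (skipDays : List Int) (out : Bool) : Prop := out = checkAnswer_alt p orders skipDays
instance (p : Int) (orders : List (Int × Int)) (skipDays : List Int) (out : Bool) : Decidable (Spec_checkAnswer p orders skipDays out) := by unfold Spec_checkAnswer; infer_instance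

-- ===== CLAIM (what is proved, stated in full; the proofs are below) =====
def Claim_equal_checkAnswer : Prop := ∀ (p : Int) (orders : List (Int × Int)) (skipDays : List Int), Dom_checkAnswer p orders skipDays → Spec_checkAnswer p orders skipDays (checkAnswer p orders skipDays)

-- ===== LEMMAS AND PROOFS =====

-- the binary-heap shape invariant of heapq: every non-root slot is ≥ its parent
def pvIsHeap (h : List Int) : Prop :=
  ∀ i, 0 < i → i < h.length → h.getD ((i - 1) / 2) 0 ≤ h.getD i 0

theorem getD_set (l : List Int) (i j : Nat) (a : Int) :
    (l.set i a).getD j 0 = if i = j ∧ j < l.length then a else l.getD j 0 := by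
  by_cases h2 : j < l.length
  · by_cases h : i = j <;> simp_all [List.getD_eq_getElem?_getD, List.getElem?_set]
  · have hn : l[j]? = none := List.getElem?_eq_none (by omega)
    have hn2 : (l.set i a)[j]? = none := List.getElem?_eq_none (by simpa using by omega)
    simp [List.getD_eq_getElem?_getD, hn2, h2]

theorem count_set (l : List Int) (i : Nat) (a b : Int) (hi : i < l.length) :
    (l.set i a).count b + (if l.getD i 0 = b then 1 else 0)
      = l.count b + (if a = b then 1 else 0) := by
  induction l generalizing i with
  | nil => simp at hi
  | cons x xs ih =>
    cases i with
    | zero => simp only [List.set_cons_zero, List.count_cons, List.getD_cons_zero,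
                beq_iff_eq]
              split_ifs <;> simp_all
    | succ n =>
      simp only [List.set_cons_succ, List.count_cons, List.getD_cons_succ, beq_iff_eq]
      have h := ih n (by simpa using hi)
      split_ifs at h ⊢ <;> simp_all

theorem perm_set_swap (l : List Int) (i j : Nat) (x : Int)
    (hi : i < l.length) (hj : j < l.length) (hij : i ≠ j) :
    ((l.set i (l.getD j 0)).set j x).Perm (l.set i x) := by
  rw [List.perm_iff_count]
  intro b
  have h1 := count_set ((l.set i (l.getD j 0))) j x b (by simpa using hj)
  have h2 := count_set l i (l.getD j 0) b hi
  have h3 := count_set l i x b hi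
  have h4 : (l.set i (l.getD j 0)).getD j 0 = l.getD j 0 := by
    rw [getD_set]; simp [hij]
  rw [h4] at h1
  split_ifs at h1 h2 h3 <;> omega

theorem set_write_heap (heap : List Int) (pos : Nat) (newitem : Int)
    (hpos : pos < heap.length)
    (hL1 : ∀ i, 0 < i → i < heap.length → i ≠ pos →
      heap.getD ((i - 1) / 2) 0 ≤ heap.getD i 0)
    (hL2 : ∀ j, 0 < j → j < heap.length → (j - 1) / 2 = pos → newitem ≤ heap.getD j 0)
    (hstop : 0 < pos → heap.getD ((pos - 1) / 2) 0 ≤ newitem) :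
    pvIsHeap (heap.set pos newitem) := by
  intro i hi hlen
  rw [List.length_set] at hlen
  rw [getD_set, getD_set]
  split_ifs with hA hB hB
  · omega
  · exact hL2 i hi hlen hA.1.symm
  · have hip : i = pos := hB.1.symm
    subst hip
    exact hstop hi
  · have hip : i ≠ pos := by intro h; exact hB ⟨h.symm, hlen⟩
    exact hL1 i hi hlen hip

theorem pvSiftdown_ok (pos : Nat) (heap : List Int) (newitem : Int)
    (hpos : pos < heap.length)
    (hL1 : ∀ i, 0 < i → i < heap.length → i ≠ pos →
      heap.getD ((i - 1) / 2) 0 ≤ heap.getD i 0)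
    (hL2 : ∀ j, 0 < j → j < heap.length → (j - 1) / 2 = pos → newitem ≤ heap.getD j 0)
    (hL3 : ∀ j, 0 < j → j < heap.length → (j - 1) / 2 = pos → 0 < pos →
      heap.getD ((pos - 1) / 2) 0 ≤ heap.getD j 0) :
    pvIsHeap (pvSiftdown heap 0 pos newitem) ∧
      (pvSiftdown heap 0 pos newitem).Perm (heap.set pos newitem) := by
  induction pos using Nat.strong_induction_on generalizing heap with
  | _ pos IH =>
  rw [pvSiftdown]
  by_cases h0 : 0 < pos
  · simp only [dif_pos h0]
    set q := (pos - 1) / 2 with hqdef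
    have hqlt : q < pos := by omega
    by_cases hlt : newitem < heap.getD q 0
    · simp only [if_pos hlt]
      set heap' := heap.set pos (heap.getD q 0) with hh'
      have hlen' : heap'.length = heap.length := by simp [hh']
      have hgq : heap'.getD q 0 = heap.getD q 0 := by
        rw [hh', getD_set]; simp [show ¬(pos = q) by omega]
      have hgpos : heap'.getD pos 0 = heap.getD q 0 := by
        rw [hh', getD_set]; simp [hpos]
      have hother : ∀ i, i ≠ pos → heap'.getD i 0 = heap.getD i 0 := by
        intro i hne
        rw [hh', getD_set, if_neg (by intro h; exact hne h.1.symm)]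
      have main := IH q hqlt heap' (by omega)
        (by -- hL1'
          intro i hi hilen hiq
          rw [hlen'] at hilen
          by_cases hip : i = pos
          · subst hip
            have : (i - 1) / 2 = q := hqdef.symm
            rw [this, hgq, hgpos]
          · rw [hother i hip]
            by_cases hpar : (i - 1) / 2 = pos
            · rw [hpar, hgpos]
              exact hL3 i hi hilen hpar h0
            · rw [hother _ hpar]
              exact hL1 i hi hilen hip)
        (by -- hL2'
          intro j hj hjlen hpar
          rw [hlen'] at hjlen
          by_cases hjp : j = pos
          · subst hjp; rw [hgpos]; exact le_of_lt hlt
          · rw [hother j hjp]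
            have : j ≠ q := by omega
            calc newitem ≤ heap.getD q 0 := le_of_lt hlt
              _ ≤ heap.getD j 0 := by
                have := hL1 j hj hjlen hjp
                rwa [hpar] at this)
        (by -- hL3'
          intro j hj hjlen hpar hq0
          rw [hlen'] at hjlen
          have hqq : (q - 1) / 2 ≠ pos := by omega
          rw [hother _ hqq]
          have hbase : heap.getD ((q - 1) / 2) 0 ≤ heap.getD q 0 :=
            hL1 q hq0 (by omega) (by omega)
          by_cases hjp : j = pos
          · subst hjp; rw [hgpos]; exact hbase
          · rw [hother j hjp]
            calc heap.getD ((q-1)/2) 0 ≤ heap.getD q 0 := hbase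
              _ ≤ heap.getD j 0 := by
                have := hL1 j hj hjlen hjp
                rwa [hpar] at this)
      refine ⟨main.1, main.2.trans ?_⟩
      rw [hh']
      exact perm_set_swap heap pos q newitem hpos (by omega) (by omega)
    · simp only [if_neg hlt]
      exact ⟨set_write_heap heap pos newitem hpos hL1 hL2
        (fun _ => le_of_not_gt hlt), List.Perm.refl _⟩
  · simp only [dif_neg h0]
    refine ⟨set_write_heap heap pos newitem hpos hL1 hL2 (fun h => absurd h h0),
      List.Perm.refl _⟩

theorem pvSiftup_ok (fuel : Nat) (heap : List Int) (pos : Nat) (newitem : Int)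
    (hfuel : heap.length - pos ≤ fuel)
    (hpos : pos < heap.length)
    (hU1 : ∀ i, 0 < i → i < heap.length → i ≠ pos → (i - 1) / 2 ≠ pos →
      heap.getD ((i - 1) / 2) 0 ≤ heap.getD i 0)
    (hU3 : ∀ j, 0 < j → j < heap.length → (j - 1) / 2 = pos → 0 < pos →
      heap.getD ((pos - 1) / 2) 0 ≤ heap.getD j 0) :
    pvIsHeap (pvSiftup heap 0 pos newitem) ∧
      (pvSiftup heap 0 pos newitem).Perm (heap.set pos newitem) := by
  induction fuel generalizing heap pos with
  | zero => omega
  | succ fuel IH =>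
  rw [pvSiftup]
  by_cases hc : 2 * pos + 1 < heap.length
  · simp only [dif_pos hc]
    set c := if 2 * pos + 1 + 1 < heap.length ∧
        ¬ (heap.getD (2 * pos + 1) 0 < heap.getD (2 * pos + 1 + 1) 0)
      then 2 * pos + 1 + 1 else 2 * pos + 1 with hcdef
    have hcrange : (c = 2 * pos + 1 ∨ c = 2 * pos + 2) ∧ c < heap.length := by
      rw [hcdef]; split_ifs with h
      · exact ⟨Or.inr rfl, h.1⟩
      · exact ⟨Or.inl rfl, hc⟩
    have hcpar : (c - 1) / 2 = pos := by omega
    have hcpos : pos < c := by omega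
    have hmin : ∀ s, 0 < s → s < heap.length → (s - 1) / 2 = pos →
        heap.getD c 0 ≤ heap.getD s 0 := by
      intro s hs hslen hspar
      have hs2 : s = 2 * pos + 1 ∨ s = 2 * pos + 2 := by omega
      by_cases hsc : s = c
      · subst hsc; exact le_refl _
      · rw [hcdef]
        rw [hcdef] at hsc
        split_ifs with h
        · split_ifs at hsc
          have hsl : s = 2 * pos + 1 := by omega
          subst hsl
          exact le_of_not_gt h.2
        · split_ifs at hsc
          have hsr : s = 2 * pos + 2 := by omega
          rcases Decidable.em (2 * pos + 1 + 1 < heap.length) with h2 | h2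
          · have := (not_and.mp h) h2
            subst hsr
            exact le_of_lt (not_not.mp this)
          · omega
    set heap' := heap.set pos (heap.getD c 0) with hh'
    have hlen' : heap'.length = heap.length := by simp [hh']
    have hgpos : heap'.getD pos 0 = heap.getD c 0 := by
      rw [hh', getD_set]; simp [hpos]
    have hother : ∀ i, i ≠ pos → heap'.getD i 0 = heap.getD i 0 := by
      intro i hne
      rw [hh', getD_set, if_neg (by intro h; exact hne h.1.symm)]
    have main := IH heap' c (by omega) (by omega)
      (by -- hU1'
        intro i hi hilen hic hipar
        rw [hlen'] at hilen
        by_cases hip : i = pos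
        · rw [hip]
          have hi0 : 0 < pos := by omega
          rw [hother _ (show (pos - 1) / 2 ≠ pos by omega), hgpos]
          exact hU3 c (by omega) hcrange.2 hcpar hi0
        · by_cases hpar : (i - 1) / 2 = pos
          · rw [hother i hip, hpar, hgpos]
            exact hmin i hi hilen hpar
          · rw [hother i hip, hother _ hpar]
            exact hU1 i hi hilen hip hpar)
      (by -- hU3'
        intro j hj hjlen hjpar hc0
        rw [hlen'] at hjlen
        rw [hcpar, hgpos]
        have hjp : j ≠ pos := by omega
        have hjc : j ≠ c := by omega
        rw [hother j hjp]
        have := hU1 j hj hjlen hjp (by omega)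
        rwa [hjpar] at this)
    refine ⟨main.1, main.2.trans ?_⟩
    rw [hh']
    exact perm_set_swap heap pos c newitem hpos hcrange.2 (by omega)
  · simp only [dif_neg hc]
    have hlen2 : (heap.set pos newitem).length = heap.length := by simp
    have hother : ∀ i, i ≠ pos → (heap.set pos newitem).getD i 0 = heap.getD i 0 := by
      intro i hne
      rw [getD_set, if_neg (by intro h; exact hne h.1.symm)]
    have ok := pvSiftdown_ok pos (heap.set pos newitem) newitem (by simpa using hpos)
      (by
        intro i hi hilen hip
        rw [hlen2] at hilen
        have hpar : (i - 1) / 2 ≠ pos := by omega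
        rw [hother i hip, hother _ hpar]
        exact hU1 i hi hilen hip hpar)
      (by intro j hj hjlen hjpar; rw [hlen2] at hjlen; omega)
      (by intro j hj hjlen hjpar; rw [hlen2] at hjlen; omega)
    refine ⟨ok.1, ok.2.trans ?_⟩
    rw [List.set_set]

theorem pvHeappush_ok (h : List Int) (x : Int) (hh : pvIsHeap h) :
    pvIsHeap (pvHeappush h x) ∧ (pvHeappush h x).Perm (x :: h) := by
  have hlen : (h ++ [x]).length = h.length + 1 := by simp
  have happ : ∀ i, i < h.length → (h ++ [x]).getD i 0 = h.getD i 0 := by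
    intro i hi
    rw [List.getD_append _ _ _ _ hi]
  have ok := pvSiftdown_ok h.length (h ++ [x]) x (by omega)
    (by
      intro i hi hilen hip
      rw [hlen] at hilen
      have hi2 : i < h.length := by omega
      rw [happ i hi2, happ _ (by omega)]
      exact hh i hi hi2)
    (by intro j hj hjlen hjpar; rw [hlen] at hjlen; omega)
    (by intro j hj hjlen hjpar; rw [hlen] at hjlen; omega)
  rw [pvHeappush]
  refine ⟨ok.1, ok.2.trans ?_⟩
  have : (h ++ [x]).set h.length x = h ++ [x] := by
    rw [List.set_append_right _ _ (le_refl _)]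
    simp
  rw [this]
  exact List.perm_append_singleton x h

theorem pvRoot_min (h : List Int) (hh : pvIsHeap h) :
    ∀ i, i < h.length → h.getD 0 0 ≤ h.getD i 0 := by
  intro i
  induction i using Nat.strong_induction_on with
  | _ i IH =>
  intro hi
  rcases Nat.eq_zero_or_pos i with h0 | h0
  · subst h0; exact le_refl _
  · calc h.getD 0 0 ≤ h.getD ((i - 1) / 2) 0 := IH _ (by omega) (by omega)
      _ ≤ h.getD i 0 := hh i h0 hi

theorem pvHeappop_ok (h : List Int) (hh : pvIsHeap h) :
    pvIsHeap (pvHeappopHeap h) ∧ (pvHeappopHeap h).Perm h.tail := by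
  rcases List.eq_nil_or_concat h with rfl | ⟨rest, last, rfl⟩
  · simp [pvHeappopHeap, pvIsHeap]
  · simp only [List.concat_eq_append] at hh ⊢
    have hdrop : (rest ++ [last]).dropLast = rest := by simp
    have hlastv : (rest ++ [last]).getLast?.getD 0 = last := by simp
    simp only [pvHeappopHeap, hdrop, hlastv]
    have happ : ∀ j, j < rest.length →
        (rest ++ [last]).getD j 0 = rest.getD j 0 := by
      intro j hj
      rw [List.getD_append _ _ _ _ hj]
    have hrest : pvIsHeap rest := by
      intro i hi hilen
      rw [← happ i hilen, ← happ _ (by omega)]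
      exact hh i hi (by simp; omega)
    rcases rest with _ | ⟨r0, rt⟩
    · simp [pvIsHeap]
    · rw [if_neg (by simp)]
      have hset : ((r0 :: rt).set 0 last) = last :: rt := rfl
      rw [hset]
      have ok := pvSiftup_ok ((last :: rt).length + 1) (last :: rt) 0 last
        (by omega) (by simp)
        (by
          intro i hi hilen hip hipar
          have h1 : (last :: rt).getD i 0 = (r0 :: rt).getD i 0 := by
            cases i with
            | zero => omega
            | succ n => rfl
          have h2 : (last :: rt).getD ((i - 1) / 2) 0 = (r0 :: rt).getD ((i - 1) / 2) 0 := by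
            rcases Nat.eq_zero_or_pos ((i - 1) / 2) with hz | hz
            · omega
            · rcases Nat.exists_eq_add_of_lt hz with ⟨k, hk⟩
              rw [show (i - 1) / 2 = k + 1 by omega]
              rfl
          rw [h1, h2]
          exact hrest i hi (by simpa using hilen))
        (by intro j hj hjlen hjpar h0; omega)
      refine ⟨ok.1, (ok.2.trans ?_)⟩
      rw [show (last :: rt).set 0 last = last :: rt from rfl]
      simp only [List.cons_append, List.tail_cons]
      exact (List.perm_append_singleton last rt).symm

theorem pvInsort_perm (x : Int) (s : List Int) : (pvInsort x s).Perm (x :: s) := by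
  induction s with
  | nil => exact List.Perm.refl _
  | cons y ys ih =>
    rw [pvInsort]
    split_ifs with hyx
    · exact (ih.cons y).trans (List.Perm.swap x y ys)
    · exact List.Perm.refl _

theorem pvInsort_sorted (x : Int) (s : List Int) (hs : s.Sorted (· ≤ ·)) :
    (pvInsort x s).Sorted (· ≤ ·) := by
  induction s with
  | nil => simp [pvInsort, List.sorted_singleton]
  | cons y ys ih =>
    rw [pvInsort]
    rw [List.sorted_cons] at hs
    split_ifs with hyx
    · rw [List.sorted_cons]
      refine ⟨?_, ih hs.2⟩
      intro b hb
      rcases List.mem_cons.mp ((pvInsort_perm x ys).mem_iff.mp hb) with h | h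
      · exact h ▸ hyx
      · exact hs.1 b h
    · rw [List.sorted_cons]
      refine ⟨?_, List.sorted_cons.mpr hs⟩
      intro b hb
      have hxy : x ≤ y := le_of_lt (lt_of_not_ge hyx)
      rcases List.mem_cons.mp hb with h | h
      · exact h ▸ hxy
      · exact hxy.trans (hs.1 b h)

theorem head_eq (h s : List Int) (hh : pvIsHeap h) (hp : h.Perm s)
    (hs : s.Sorted (· ≤ ·)) (hne : h ≠ []) : h.getD 0 0 = s.getD 0 0 := by
  rcases h with _ | ⟨h0, ht⟩
  · exact absurd rfl hne
  rcases s with _ | ⟨s0, st⟩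
  · exact absurd hp.length_eq (by simp)
  simp only [List.getD_cons_zero]
  have hmem : s0 ∈ h0 :: ht := hp.mem_iff.mpr List.mem_cons_self
  rcases List.mem_iff_getElem.mp hmem with ⟨i, hilen, hieq⟩
  have h1 : h0 ≤ s0 := by
    have := pvRoot_min _ hh i hilen
    rwa [List.getD_cons_zero, List.getD_eq_getElem _ _ hilen, hieq] at this
  have hmem2 : h0 ∈ s0 :: st := hp.mem_iff.mp List.mem_cons_self
  have h2 : s0 ≤ h0 := by
    rcases List.mem_cons.mp hmem2 with h | h
    · exact le_of_eq h.symm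
    · exact (List.sorted_cons.mp hs).1 h0 h
  exact le_antisymm h1 h2

theorem popLoop_sim (n : Nat) (h s : List Int) (hh : pvIsHeap h) (hp : h.Perm s)
    (hs : s.Sorted (· ≤ ·)) :
    pvIsHeap (pvPopLoop n h) ∧ (pvPopLoop n h).Perm (s.drop n) ∧
      (s.drop n).Sorted (· ≤ ·) := by
  induction n generalizing h s with
  | zero => exact ⟨hh, hp, hs⟩
  | succ n IH =>
  rw [pvPopLoop]
  by_cases he : h.isEmpty
  · have h0 : h = [] := List.isEmpty_iff.mp he
    have s0 : s = [] := List.Perm.eq_nil (by rw [h0] at hp; exact hp.symm)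
    subst h0; subst s0
    rw [if_pos he]
    exact ⟨hh, by rw [List.drop_nil], by rw [List.drop_nil]; exact List.sorted_nil⟩
  · rw [if_neg he]
    have hne : h ≠ [] := by intro hnil; rw [hnil] at he; exact he rfl
    rcases h with _ | ⟨h0, ht⟩
    · exact absurd rfl hne
    rcases s with _ | ⟨s0, st⟩
    · exact absurd hp.length_eq (by simp)
    have hheads : h0 = s0 := by
      have := head_eq _ _ hh hp hs hne
      simpa using this
    have htail : ht.Perm st := by
      subst hheads
      exact (List.perm_cons h0).mp hp
    have pop := pvHeappop_ok _ hh
    rw [List.drop_succ_cons]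
    have hst : st.Sorted (· ≤ ·) := (List.sorted_cons.mp hs).2
    have := IH (pvHeappopHeap (h0 :: ht)) st pop.1
      ((pop.2.trans (by simp)).trans htail) hst
    exact this

theorem release_sim (fuel : Nat) (orders : List (Int × Int)) (day : Int)
    (move_i : Nat) (h s : List Int) (hfuel : orders.length - move_i ≤ fuel)
    (hh : pvIsHeap h) (hp : h.Perm s) (hs : s.Sorted (· ≤ ·)) :
    (pvReleaseA orders day move_i h).1 = (pvReleaseB orders day move_i s).1 ∧
    pvIsHeap (pvReleaseA orders day move_i h).2 ∧
    ((pvReleaseA orders day move_i h).2).Perm ((pvReleaseB orders day move_i s).2) ∧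
    ((pvReleaseB orders day move_i s).2).Sorted (· ≤ ·) := by
  induction fuel generalizing move_i h s with
  | zero =>
    rw [pvReleaseA, pvReleaseB]
    rw [dif_neg (by omega), dif_neg (by omega)]
    exact ⟨rfl, hh, hp, hs⟩
  | succ fuel IH =>
    rw [pvReleaseA, pvReleaseB]
    by_cases hc : move_i < orders.length ∧ (orders.getD move_i (0, 0)).1 ≤ day
    · rw [dif_pos hc, dif_pos hc]
      set x := (orders.getD move_i (0, 0)).2
      have push := pvHeappush_ok h x hh
      exact IH (move_i + 1) _ _ (by omega) push.1
        (push.2.trans ((hp.cons x).trans (pvInsort_perm x s).symm))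
        (pvInsort_sorted x s hs)
    · rw [dif_neg hc, dif_neg hc]
      exact ⟨rfl, hh, hp, hs⟩

theorem dayLoop_sim (fuel : Nat) (p : Int) (orders : List (Int × Int))
    (skipDays : List Int) (day move_i : Nat) (h s : List Int)
    (hfuel : 101 - day ≤ fuel) (hh : pvIsHeap h) (hp : h.Perm s)
    (hs : s.Sorted (· ≤ ·)) :
    pvDayLoopA p orders skipDays day move_i h
      = pvDayLoopB p orders skipDays day move_i s := by
  induction fuel generalizing day move_i h s with
  | zero => rw [pvDayLoopA, pvDayLoopB, dif_neg (by omega), dif_neg (by omega)]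
  | succ fuel IH =>
  rw [pvDayLoopA, pvDayLoopB]
  by_cases hday : day ≤ 100
  · rw [dif_pos hday, dif_pos hday]
    dsimp only
    obtain ⟨hmv, hh1, hp1, hs1⟩ := release_sim (orders.length + 1) orders
      (Int.ofNat day) move_i h s (by omega) hh hp hs
    have cont : ∀ (h2 s2 : List Int), pvIsHeap h2 → h2.Perm s2 →
        s2.Sorted (· ≤ ·) →
        ((if ¬ h2.isEmpty ∧ h2.getD 0 0 ≤ Int.ofNat day then false
          else if h2.isEmpty ∧ (pvReleaseA orders (Int.ofNat day) move_i h).1 = orders.length then true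
          else pvDayLoopA p orders skipDays (day + 1) (pvReleaseA orders (Int.ofNat day) move_i h).1 h2) =
         (if ¬ s2.isEmpty ∧ s2.getD 0 0 ≤ Int.ofNat day then false
          else if s2.isEmpty ∧ (pvReleaseB orders (Int.ofNat day) move_i s).1 = orders.length then true
          else pvDayLoopB p orders skipDays (day + 1) (pvReleaseB orders (Int.ofNat day) move_i s).1 s2)) := by
      intro h2 s2 hh2 hp2 hs2
      by_cases h2e : h2.isEmpty = true
      · have h2nil : h2 = [] := List.isEmpty_iff.mp h2e
        have s2nil : s2 = [] := List.Perm.eq_nil (by rw [h2nil] at hp2; exact hp2.symm)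
        have s2e : s2.isEmpty = true := by rw [s2nil]; rfl
        rw [if_neg (show ¬(¬h2.isEmpty ∧ h2.getD 0 0 ≤ Int.ofNat day) from fun hx => hx.1 h2e),
            if_neg (show ¬(¬s2.isEmpty ∧ s2.getD 0 0 ≤ Int.ofNat day) from fun hx => hx.1 s2e)]
        by_cases hm2 : (pvReleaseA orders (Int.ofNat day) move_i h).1 = orders.length
        · rw [if_pos (show (h2.isEmpty ∧ (pvReleaseA orders (Int.ofNat day) move_i h).1 = orders.length) from ⟨h2e, hm2⟩),
              if_pos (show (s2.isEmpty ∧ (pvReleaseB orders (Int.ofNat day) move_i s).1 = orders.length) from ⟨s2e, by rw [← hmv]; exact hm2⟩)]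
        · rw [if_neg (show ¬(h2.isEmpty ∧ (pvReleaseA orders (Int.ofNat day) move_i h).1 = orders.length) from fun hx => hm2 hx.2),
              if_neg (show ¬(s2.isEmpty ∧ (pvReleaseB orders (Int.ofNat day) move_i s).1 = orders.length) from fun hx => hm2 (by rw [hmv]; exact hx.2))]
          rw [← hmv]
          exact IH (day + 1) _ _ _ (by omega) hh2 hp2 hs2
      · have hne : h2 ≠ [] := by intro hnil; rw [hnil] at h2e; exact h2e rfl
        have s2ne : s2 ≠ [] := by
          intro hnil
          rw [hnil] at hp2
          exact hne (List.Perm.eq_nil hp2)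
        have s2e : ¬ s2.isEmpty = true := by
          intro hx; exact s2ne (List.isEmpty_iff.mp hx)
        have hgd : h2.getD 0 0 = s2.getD 0 0 := head_eq h2 s2 hh2 hp2 hs2 hne
        by_cases hle : h2.getD 0 0 ≤ Int.ofNat day
        · rw [if_pos (show (¬h2.isEmpty ∧ h2.getD 0 0 ≤ Int.ofNat day) from ⟨h2e, hle⟩),
              if_pos (show (¬s2.isEmpty ∧ s2.getD 0 0 ≤ Int.ofNat day) from ⟨s2e, hgd ▸ hle⟩)]
        · rw [if_neg (show ¬(¬h2.isEmpty ∧ h2.getD 0 0 ≤ Int.ofNat day) from fun hx => hle hx.2),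
              if_neg (show ¬(¬s2.isEmpty ∧ s2.getD 0 0 ≤ Int.ofNat day) from fun hx => hle (by rw [hgd]; exact hx.2))]
          rw [if_neg (show ¬(h2.isEmpty ∧ (pvReleaseA orders (Int.ofNat day) move_i h).1 = orders.length) from fun hx => h2e hx.1),
              if_neg (show ¬(s2.isEmpty ∧ (pvReleaseB orders (Int.ofNat day) move_i s).1 = orders.length) from fun hx => s2e hx.1)]
          rw [← hmv]
          exact IH (day + 1) _ _ _ (by omega) hh2 hp2 hs2
    by_cases hskip : skipDays.contains (PySem.Int.mod (Int.ofNat day) 7) = true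
    · rw [if_pos hskip, if_pos hskip]
      exact cont _ _ hh1 hp1 hs1
    · rw [if_neg hskip, if_neg hskip]
      obtain ⟨ph, pp, ps⟩ := popLoop_sim (PySem.Int.floordiv p 2).toNat _ _ hh1 hp1 hs1
      exact cont _ _ ph pp ps
  · rw [dif_neg hday, dif_neg hday]

-- ===== VERDICT (by name: the statement is the Claim_ definition above) =====
theorem checkAnswer_spec : Claim_equal_checkAnswer := by
  intro p orders skipDays _dom
  show checkAnswer p orders skipDays = checkAnswer_alt p orders skipDays
  rw [checkAnswer, checkAnswer_alt]
  exact dayLoop_sim 101 p orders skipDays 1 0 [] [] (by omega)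
    (fun i hi hlen => absurd hlen (by simp)) (List.Perm.refl _) List.sorted_nil
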